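-- pv_equiv track=rewrite | github.com/fanquerques/Simulating-Canadian-Elections | voting_systems.py | voting_approval
-- ===== SOURCE A (Python) =====
-- from typing import List
--
-- def voting_approval(approval_ballots: List[List[bool]],
--                     party_order: List[str]) -> List[int]:
--     """Return the total number of approvals for each party in approval
--     ballots approval_ballots, in the order specified in party_order.
--
--     Pre: len of each sublist of approval_ballots is len(party_order)
--          the approvals in each ballot are specified in the order of party_order
--
--     >>> voting_approval([[True, True, False, False],
--     ...                  [False, False, False, True],
--     ...                  [False, True, False, False]], SAMPLE_ORDER_1)
--     [1, 2, 0, 1]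
--     >>> voting_approval([[True, True, False, False],
--     ...                  [False, True, False, True],
--     ...                  [True, True, False, True]], SAMPLE_ORDER_2)
--     [2, 3, 0, 2]
--     """
--     vote_counter = 0
--     vote_sum = []
--     vote_index = 0
--     order_index = 0
--     vote_true = True
--
--     while order_index < len(party_order):
--         for sublist in approval_ballots:
--             if sublist[vote_index] == vote_true:
--                 vote_counter += 1
--         vote_sum.append(vote_counter)
--         vote_counter = 0
--         vote_index += 1
--         order_index += 1
--     return vote_sum
-- ===== SOURCE B (Python) =====
-- from typing import List
--
-- def voting_approval(approval_ballots: List[List[bool]],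
--                     party_order: List[str]) -> List[int]:
--     def tally(lo: int, hi: int) -> List[int]:
--         """Approval totals for the parties with indices in [lo, hi)."""
--         if hi - lo == 0:
--             return []
--         if hi - lo == 1:
--             return [sum(ballot[lo] for ballot in approval_ballots)]
--         mid = (lo + hi) // 2
--         return tally(lo, mid) + tally(mid, hi)
--     return tally(0, len(party_order))
-- ===== Notes on version B (the rewrite author's own statement) =====
-- stated objective: alternative
-- what changed: B computes the result by divide and conquer on the party index range (each leaf summing one column with sum() over a generator), instead of A's sequential while-loop state machine with manual counter/index variables and append.
import Mathlib
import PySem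

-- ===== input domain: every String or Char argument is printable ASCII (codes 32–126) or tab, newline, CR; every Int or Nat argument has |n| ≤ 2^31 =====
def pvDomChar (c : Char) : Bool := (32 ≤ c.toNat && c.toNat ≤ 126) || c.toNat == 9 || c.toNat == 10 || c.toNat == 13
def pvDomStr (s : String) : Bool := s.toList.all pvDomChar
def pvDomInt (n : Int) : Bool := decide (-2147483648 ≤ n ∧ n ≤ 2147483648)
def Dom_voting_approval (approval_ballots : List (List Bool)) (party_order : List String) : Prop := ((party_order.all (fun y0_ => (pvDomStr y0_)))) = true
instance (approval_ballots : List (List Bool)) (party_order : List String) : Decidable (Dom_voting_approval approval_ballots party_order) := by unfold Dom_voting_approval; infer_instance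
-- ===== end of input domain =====

-- B computes the result by divide and conquer on the party index range (each leaf summing one
-- column), instead of A's sequential while-loop state machine with manual counters and append.

-- ===== PORT A =====
-- A's while-loop: order_index and vote_index advance together, so we recurse on the number of
-- remaining parties (party_order.length - order_index) while carrying vote_index and vote_sum.
def vaWhile (approval_ballots : List (List Bool)) (fuel : Nat) (vote_index : Int)
    (vote_sum : List Int) : List Int :=
  match fuel with
  | 0 => vote_sum
  | n + 1 =>
    -- inner 'for sublist in approval_ballots: if sublist[vote_index] == vote_true: vote_counter += 1'
    let vote_counter : Int := approval_ballots.foldl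
      (fun vc sublist => if PySem.List.pyGet? sublist vote_index = some true then vc + 1 else vc) 0
    vaWhile approval_ballots n (vote_index + 1) (vote_sum ++ [vote_counter])

def voting_approval (approval_ballots : List (List Bool)) (party_order : List String) : List Int :=
  vaWhile approval_ballots party_order.length 0 []

-- ===== PORT B =====
-- sum(ballot[lo] for ballot in approval_ballots): True counts as 1.  ballot[lo] raising
-- IndexError (pyGet? = none) lies outside Pre_; this port is exact wherever every lookup hits.
def vbColSum (bs : List (List Bool)) (i : Int) : Int :=
  bs.foldl (fun s ballot => s + if PySem.List.pyGet? ballot i = some true then 1 else 0) 0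

-- tally(lo, hi): approval totals for the parties with indices in [lo, hi), by bisection.
-- (lo, hi are Python ints that stay ≥ 0 here, so Nat with Nat division matches (lo+hi)//2;
--  fuel = hi - lo is a totality guard only: it strictly exceeds both recursive gaps.)
def vbTally (bs : List (List Bool)) (fuel : Nat) (lo hi : Nat) : List Int :=
  match fuel with
  | 0 => []
  | f + 1 =>
    if hi - lo = 0 then []
    else if hi - lo = 1 then [vbColSum bs (lo : Int)]
    else vbTally bs f lo ((lo + hi) / 2) ++ vbTally bs f ((lo + hi) / 2) hi

def voting_approval_alt (approval_ballots : List (List Bool)) (party_order : List String) : List Int :=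
  vbTally approval_ballots party_order.length 0 party_order.length

-- ===== PRECONDITION & SPEC =====
-- Pre_ excludes exactly the inputs where the Python A raises IndexError (a ballot shorter than
-- party_order); B raises there identically, so nothing A returns on is excluded.
def Pre_voting_approval (approval_ballots : List (List Bool)) (party_order : List String) : Prop :=
  ∀ b ∈ approval_ballots, party_order.length ≤ b.length
instance (approval_ballots : List (List Bool)) (party_order : List String) : Decidable (Pre_voting_approval approval_ballots party_order) := by unfold Pre_voting_approval; infer_instance
def pvWitness_voting_approval : List (List Bool) × List String :=
  ([[true, true, false], [false, true, false]], ["a", "b", "c"])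

def Spec_voting_approval (approval_ballots : List (List Bool)) (party_order : List String) (out : List Int) : Prop := out = voting_approval_alt approval_ballots party_order
instance (approval_ballots : List (List Bool)) (party_order : List String) (out : List Int) : Decidable (Spec_voting_approval approval_ballots party_order out) := by unfold Spec_voting_approval; infer_instance

-- ===== CLAIM (what is proved, stated in full; the proofs are below) =====
def Claim_equal_voting_approval : Prop := ∀ (approval_ballots : List (List Bool)) (party_order : List String), Dom_voting_approval approval_ballots party_order → Pre_voting_approval approval_ballots party_order → Spec_voting_approval approval_ballots party_order (voting_approval approval_ballots party_order)

-- ===== LEMMAS AND PROOFS =====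

-- number of ballots approving column j (what both programs compute, per column)
def colCnt (approval_ballots : List (List Bool)) (j : Int) : Int :=
  (approval_ballots.countP (fun sublist => decide (PySem.List.pyGet? sublist j = some true)) : Int)

theorem vaWhile_eq (bs : List (List Bool)) (n : Nat) (j : Int) (acc : List Int) :
    vaWhile bs n j acc = acc ++ (List.range n).map (fun k : Nat => colCnt bs (j + (k : Int))) := by
  induction n generalizing j acc with
  | zero => simp [vaWhile]
  | succ n ih =>
    rw [vaWhile, ih, List.range_succ_eq_map]
    rw [List.append_assoc, List.singleton_append, List.map_cons, List.map_map]
    congr 1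
    congr 1
    · rw [PySem.List.foldl_ite_add_one]
      simp [colCnt]
    · refine List.map_congr_left fun k _ => ?_
      simp only [Function.comp, Nat.succ_eq_add_one]
      congr 1
      push_cast
      ring

theorem colCnt_cons (b : List Bool) (bs : List (List Bool)) (j : Int) :
    colCnt (b :: bs) j
      = (if PySem.List.pyGet? b j = some true then 1 else 0) + colCnt bs j := by
  unfold colCnt
  rw [List.countP_cons]
  by_cases h : PySem.List.pyGet? b j = some true
  · simp [h]; ring
  · simp [h]

theorem vbColSum_foldl (bs : List (List Bool)) (i : Int) (s : Int) :
    bs.foldl (fun s ballot => s + if PySem.List.pyGet? ballot i = some true then 1 else 0) s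
      = s + colCnt bs i := by
  induction bs generalizing s with
  | nil => simp [colCnt]
  | cons b t ih =>
    simp only [List.foldl_cons]
    rw [ih, colCnt_cons]
    ring

theorem vbColSum_eq (bs : List (List Bool)) (i : Int) : vbColSum bs i = colCnt bs i := by
  unfold vbColSum
  rw [vbColSum_foldl]
  ring

theorem range'_split (lo mid hi : Nat) (h1 : lo ≤ mid) (h2 : mid ≤ hi) :
    List.range' lo (mid - lo) ++ List.range' mid (hi - mid) = List.range' lo (hi - lo) := by
  obtain ⟨a, rfl⟩ := Nat.le.dest h1
  obtain ⟨b, rfl⟩ := Nat.le.dest h2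
  have e1 : lo + a - lo = a := by omega
  have e2 : lo + a + b - (lo + a) = b := by omega
  have e3 : lo + a + b - lo = a + b := by omega
  rw [e1, e2, e3, List.range'_append_1]

theorem vbTally_eq (bs : List (List Bool)) :
    ∀ (fuel lo hi : Nat), hi - lo ≤ fuel →
      vbTally bs fuel lo hi = (List.range' lo (hi - lo)).map (fun k : Nat => colCnt bs (k : Int)) := by
  intro fuel
  induction fuel with
  | zero =>
    intro lo hi hd
    have h0 : hi - lo = 0 := by omega
    rw [vbTally, h0]
    simp
  | succ f ih =>
    intro lo hi hd
    by_cases h0 : hi - lo = 0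
    · rw [vbTally, if_pos h0, h0]
      simp
    · by_cases h1 : hi - lo = 1
      · rw [vbTally, if_neg h0, if_pos h1, h1]
        simp [vbColSum_eq]
      · rw [vbTally, if_neg h0, if_neg h1]
        rw [ih lo ((lo + hi) / 2) (by omega), ih ((lo + hi) / 2) hi (by omega)]
        rw [← List.map_append]
        congr 1
        exact range'_split lo ((lo + hi) / 2) hi (by omega) (by omega)

-- ===== VERDICT (by name: the statement is the Claim_ definition above) =====
theorem voting_approval_spec : Claim_equal_voting_approval := by
  intro bs order _ _
  unfold Spec_voting_approval voting_approval voting_approval_alt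
  rw [vaWhile_eq, vbTally_eq bs order.length 0 order.length (by omega)]
  simp [List.range_eq_range']
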